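-- pv_equiv track=rewrite | github.com/songjy6565/alg-py | programmers/level3/A19.py | solution
-- ===== SOURCE A (Python) =====
-- def solution(dirs):
--     answer = 0
--     horiz = []
--     verti = []
--     for i in range(11):
--         horiz.append([0,0,0,0,0,0,0,0,0,0])
--         verti.append([0,0,0,0,0,0,0,0,0,0])
--     cur = [5,5]
--
--     for e in dirs:
--         if e == 'U':
--             if cur[1] == 10:
--                 continue
--             elif verti[cur[0]][cur[1]] != 1:
--                 answer += 1
--                 verti[cur[0]][cur[1]] = 1
--             cur[1] += 1
--         elif e == 'D':
--             if cur[1] == 0: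
--                 continue
--             elif verti[cur[0]][cur[1]-1] != 1:
--                 answer += 1
--                 verti[cur[0]][cur[1]-1] = 1
--             cur[1] -= 1
--         elif e == 'R':
--             if cur[0] == 10:
--                 continue
--             elif horiz[cur[1]][cur[0]] != 1:
--                 answer += 1
--                 horiz[cur[1]][cur[0]] = 1
--             cur[0] += 1
--         elif e == 'L':
--             if cur[0] == 0:
--                 continue
--             elif horiz[cur[1]][cur[0]-1] != 1:
--                 answer += 1
--                 horiz[cur[1]][cur[0]-1] = 1
--             cur[0] -= 1
--     return answer
-- ===== SOURCE B (Python) =====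
-- def solution(dirs):
--     moves = {'U': (0, 1), 'D': (0, -1), 'L': (-1, 0), 'R': (1, 0)}
--     # stage 1: replay the walk, recording each traversed edge as one integer id
--     x, y = 5, 5
--     walked = []
--     for ch in dirs:
--         if ch in moves:
--             dx, dy = moves[ch]
--             nx, ny = x + dx, y + dy
--             if 0 <= nx <= 10 and 0 <= ny <= 10:
--                 lo = min(x, nx) * 11 + min(y, ny)
--                 hi = max(x, nx) * 11 + max(y, ny)
--                 walked.append(lo * 121 + hi)
--                 x, y = nx, ny
--     # stage 2: sort the edge ids and sweep, counting runs of equal values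
--     walked.sort()
--     count = 0
--     prev = None
--     for e in walked:
--         if e != prev:
--             count += 1
--             prev = e
--     return count
-- ===== Notes on version B (the rewrite author's own statement) =====
-- stated objective: alternative
-- what changed: Replaces A's online marking in two 11x11 matrices by a two-stage sort-then-sweep: stage 1 replays the walk into a list of integer-encoded canonical edge ids, stage 2 sorts that list and counts runs of equal values.
import Mathlib
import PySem

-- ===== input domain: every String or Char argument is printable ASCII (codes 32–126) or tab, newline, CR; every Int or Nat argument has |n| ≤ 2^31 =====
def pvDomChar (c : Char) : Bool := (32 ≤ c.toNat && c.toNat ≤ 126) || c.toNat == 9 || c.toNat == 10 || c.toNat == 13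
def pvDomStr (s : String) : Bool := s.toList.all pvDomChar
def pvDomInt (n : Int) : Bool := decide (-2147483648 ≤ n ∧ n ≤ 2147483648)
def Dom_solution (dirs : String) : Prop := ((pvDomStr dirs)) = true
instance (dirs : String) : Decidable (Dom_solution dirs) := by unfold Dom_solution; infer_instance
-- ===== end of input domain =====

-- B replaces A's online marking in two 11x11 matrices by a two-stage sort-then-sweep:
-- first it replays the walk into a list of integer-encoded canonical edges, then sorts
-- that list and counts runs of equal values (alternative algorithm, not claimed faster).

-- ===== PORT A =====
-- A's loop state: answer, the two marker matrices, and the current position cur = [cx, cy].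
structure SA where
  ans : Int
  horiz : List (List Int)
  verti : List (List Int)
  cx : Int
  cy : Int
deriving Repr

-- matrix read m[i][j]; exact for the nonnegative in-range indices A's guarded loop produces
def mget (m : List (List Int)) (i j : Int) : Int := (m.getD i.toNat []).getD j.toNat 0

-- matrix write m[i][j] = 1; exact for the nonnegative in-range indices A's guarded loop produces
def mset (m : List (List Int)) (i j : Int) : List (List Int) :=
  m.set i.toNat ((m.getD i.toNat []).set j.toNat 1)

def stepA (s : SA) (e : Char) : SA :=
  if e = 'U' then
    if s.cy = 10 then s
    else
      let s' := if mget s.verti s.cx s.cy ≠ 1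
        then { s with ans := s.ans + 1, verti := mset s.verti s.cx s.cy } else s
      { s' with cy := s'.cy + 1 }
  else if e = 'D' then
    if s.cy = 0 then s
    else
      let s' := if mget s.verti s.cx (s.cy - 1) ≠ 1
        then { s with ans := s.ans + 1, verti := mset s.verti s.cx (s.cy - 1) } else s
      { s' with cy := s'.cy - 1 }
  else if e = 'R' then
    if s.cx = 10 then s
    else
      let s' := if mget s.horiz s.cy s.cx ≠ 1
        then { s with ans := s.ans + 1, horiz := mset s.horiz s.cy s.cx } else s
      { s' with cx := s'.cx + 1 }
  else if e = 'L' then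
    if s.cx = 0 then s
    else
      let s' := if mget s.horiz s.cy (s.cx - 1) ≠ 1
        then { s with ans := s.ans + 1, horiz := mset s.horiz s.cy (s.cx - 1) } else s
      { s' with cx := s'.cx - 1 }
  else s

def initM : List (List Int) := List.replicate 11 (List.replicate 10 0)

def solution (dirs : String) : Int :=
  (dirs.toList.foldl stepA ⟨0, initM, initM, 5, 5⟩).ans

-- ===== PORT B =====
-- B's stage-1 state: current position and the list of integer edge ids walked so far.
structure SB where
  cx : Int
  cy : Int
  walked : List Int
deriving Repr

def moves : PySem.Dict Char (Int × Int) :=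
  PySem.Dict.ofList [('U', (0, 1)), ('D', (0, -1)), ('L', (-1, 0)), ('R', (1, 0))]

def stepB (s : SB) (ch : Char) : SB :=
  match PySem.Dict.get? moves ch with
  | none => s
  | some (dx, dy) =>
    let nx := s.cx + dx
    let ny := s.cy + dy
    if 0 ≤ nx ∧ nx ≤ 10 ∧ 0 ≤ ny ∧ ny ≤ 10 then
      let lo := min s.cx nx * 11 + min s.cy ny
      let hi := max s.cx nx * 11 + max s.cy ny
      { cx := nx, cy := ny, walked := s.walked ++ [lo * 121 + hi] }
    else s

-- B's stage-2 sweep over the sorted edge ids: 'if e != prev: count += 1; prev = e'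
def sweepStep (s : Int × Option Int) (e : Int) : Int × Option Int :=
  if some e = s.2 then s else (s.1 + 1, some e)

def solution_alt (dirs : String) : Int :=
  let fin := dirs.toList.foldl stepB ⟨5, 5, []⟩
  ((PySem.List.sorted fin.walked (fun e => e) false).foldl sweepStep (0, none)).1

-- ===== PRECONDITION & SPEC =====
def Spec_solution (dirs : String) (out : Int) : Prop := out = solution_alt dirs
instance (dirs : String) (out : Int) : Decidable (Spec_solution dirs out) := by unfold Spec_solution; infer_instance

-- ===== CLAIM (what is proved, stated in full; the proofs are below) =====
def Claim_equal_solution : Prop := ∀ (dirs : String), Dom_solution dirs → Spec_solution dirs (solution dirs)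

-- ===== LEMMAS AND PROOFS =====

-- integer encodings of the vertical edge (x,y)-(x,y+1) and horizontal edge (x,y)-(x+1,y)
def encV (x y : Int) : Int := (x * 11 + y) * 121 + (x * 11 + (y + 1))
def encH (x y : Int) : Int := (x * 11 + y) * 121 + ((x + 1) * 11 + y)

-- The simulation relation between A's state and B's stage-1 state.
def InvAB (a : SA) (b : SB) : Prop :=
  a.cx = b.cx ∧ a.cy = b.cy ∧
  0 ≤ a.cx ∧ a.cx ≤ 10 ∧ 0 ≤ a.cy ∧ a.cy ≤ 10 ∧
  a.ans = ((PySem.Set.ofList b.walked).length : Int) ∧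
  a.horiz.length = 11 ∧ (∀ r ∈ a.horiz, r.length = 10) ∧
  a.verti.length = 11 ∧ (∀ r ∈ a.verti, r.length = 10) ∧
  (∀ x y : Int, 0 ≤ x → x ≤ 10 → 0 ≤ y → y < 10 →
    (mget a.verti x y = 1 ↔ encV x y ∈ b.walked)) ∧
  (∀ x y : Int, 0 ≤ x → x < 10 → 0 ≤ y → y ≤ 10 →
    (mget a.horiz y x = 1 ↔ encH x y ∈ b.walked))

lemma getD_set_row (l : List (List Int)) (i : Nat) (a : List Int) (j : Nat) :
    (l.set i a).getD j [] = if j = i ∧ i < l.length then a else l.getD j [] := by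
  simp only [List.getD_eq_getElem?_getD, List.getElem?_set]
  by_cases h1 : i = j
  · subst h1
    by_cases h2 : i < l.length <;> simp [h2]
  · simp [h1]
    intro h
    exact absurd h (Ne.symm h1)

lemma getD_set_entry (r : List Int) (j : Nat) (y : Nat) :
    (r.set j 1).getD y 0 = if y = j ∧ j < r.length then 1 else r.getD y 0 := by
  simp only [List.getD_eq_getElem?_getD, List.getElem?_set]
  by_cases h1 : j = y
  · subst h1
    by_cases h2 : j < r.length <;> simp [h2]
  · simp [h1]
    intro h
    exact absurd h (Ne.symm h1)

lemma getD_mem (m : List (List Int)) (i : Nat) (h : i < m.length) : m.getD i [] ∈ m := by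
  rw [List.getD_eq_getElem?_getD, List.getElem?_eq_getElem h]
  exact List.getElem_mem h

lemma mset_shape (m : List (List Int)) (hl : m.length = 11) (hr : ∀ r ∈ m, r.length = 10)
    (i j : Int) :
    (mset m i j).length = 11 ∧ ∀ r ∈ mset m i j, r.length = 10 := by
  by_cases hi : i.toNat < m.length
  · refine ⟨by simp [mset, hl], ?_⟩
    intro r hrm
    rcases List.mem_or_eq_of_mem_set hrm with h | h
    · exact hr r h
    · subst h
      rw [List.length_set]
      exact hr _ (getD_mem m i.toNat hi)
  · unfold mset
    rw [List.set_eq_of_length_le (by omega)]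
    exact ⟨hl, hr⟩

lemma mget_mset (m : List (List Int)) (hl : m.length = 11) (hr : ∀ r ∈ m, r.length = 10)
    (i j x y : Int) (hi : 0 ≤ i) (hi' : i ≤ 10) (hj : 0 ≤ j) (hj' : j < 10)
    (hx : 0 ≤ x) (hx' : x ≤ 10) (hy : 0 ≤ y) (hy' : y < 10) :
    mget (mset m i j) x y = if x = i ∧ y = j then 1 else mget m x y := by
  have hiN : i.toNat < m.length := by omega
  have hrow : (m.getD i.toNat []).length = 10 := hr _ (getD_mem m i.toNat hiN)
  unfold mget mset
  rw [getD_set_row]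
  by_cases hxi : x = i
  · subst hxi
    rw [if_pos ⟨rfl, hiN⟩, getD_set_entry, hrow]
    by_cases hyj : y = j
    · subst hyj
      rw [if_pos ⟨rfl, by omega⟩, if_pos ⟨rfl, rfl⟩]
    · rw [if_neg (by omega), if_neg (fun hc => hyj hc.2)]
  · rw [if_neg (by omega), if_neg (fun hc => hxi hc.1)]

lemma stepA_U (ans ax ay : Int) (hz vt : List (List Int)) :
    stepA ⟨ans, hz, vt, ax, ay⟩ 'U' =
    if ay = 10 then ⟨ans, hz, vt, ax, ay⟩
    else if mget vt ax ay ≠ 1 then ⟨ans + 1, hz, mset vt ax ay, ax, ay + 1⟩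
    else ⟨ans, hz, vt, ax, ay + 1⟩ := by
  show (if ay = 10 then (⟨ans, hz, vt, ax, ay⟩ : SA)
    else
      let s' := if mget vt ax ay ≠ 1 then (⟨ans + 1, hz, mset vt ax ay, ax, ay⟩ : SA)
        else ⟨ans, hz, vt, ax, ay⟩
      (⟨s'.ans, s'.horiz, s'.verti, s'.cx, s'.cy + 1⟩ : SA)) = _
  by_cases hb : ay = 10
  · rw [if_pos hb, if_pos hb]
  · rw [if_neg hb, if_neg hb]
    by_cases hm : mget vt ax ay ≠ 1
    · rw [if_pos hm, if_pos hm]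
    · rw [if_neg hm, if_neg hm]

lemma stepA_D (ans ax ay : Int) (hz vt : List (List Int)) :
    stepA ⟨ans, hz, vt, ax, ay⟩ 'D' =
    if ay = 0 then ⟨ans, hz, vt, ax, ay⟩
    else if mget vt ax (ay - 1) ≠ 1 then ⟨ans + 1, hz, mset vt ax (ay - 1), ax, ay - 1⟩
    else ⟨ans, hz, vt, ax, ay - 1⟩ := by
  show (if ay = 0 then (⟨ans, hz, vt, ax, ay⟩ : SA)
    else
      let s' := if mget vt ax (ay - 1) ≠ 1 then (⟨ans + 1, hz, mset vt ax (ay - 1), ax, ay⟩ : SA)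
        else ⟨ans, hz, vt, ax, ay⟩
      (⟨s'.ans, s'.horiz, s'.verti, s'.cx, s'.cy - 1⟩ : SA)) = _
  by_cases hb : ay = 0
  · rw [if_pos hb, if_pos hb]
  · rw [if_neg hb, if_neg hb]
    by_cases hm : mget vt ax (ay - 1) ≠ 1
    · rw [if_pos hm, if_pos hm]
    · rw [if_neg hm, if_neg hm]

lemma stepA_R (ans ax ay : Int) (hz vt : List (List Int)) :
    stepA ⟨ans, hz, vt, ax, ay⟩ 'R' =
    if ax = 10 then ⟨ans, hz, vt, ax, ay⟩
    else if mget hz ay ax ≠ 1 then ⟨ans + 1, mset hz ay ax, vt, ax + 1, ay⟩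
    else ⟨ans, hz, vt, ax + 1, ay⟩ := by
  show (if ax = 10 then (⟨ans, hz, vt, ax, ay⟩ : SA)
    else
      let s' := if mget hz ay ax ≠ 1 then (⟨ans + 1, mset hz ay ax, vt, ax, ay⟩ : SA)
        else ⟨ans, hz, vt, ax, ay⟩
      (⟨s'.ans, s'.horiz, s'.verti, s'.cx + 1, s'.cy⟩ : SA)) = _
  by_cases hb : ax = 10
  · rw [if_pos hb, if_pos hb]
  · rw [if_neg hb, if_neg hb]
    by_cases hm : mget hz ay ax ≠ 1
    · rw [if_pos hm, if_pos hm]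
    · rw [if_neg hm, if_neg hm]

lemma stepA_L (ans ax ay : Int) (hz vt : List (List Int)) :
    stepA ⟨ans, hz, vt, ax, ay⟩ 'L' =
    if ax = 0 then ⟨ans, hz, vt, ax, ay⟩
    else if mget hz ay (ax - 1) ≠ 1 then ⟨ans + 1, mset hz ay (ax - 1), vt, ax - 1, ay⟩
    else ⟨ans, hz, vt, ax - 1, ay⟩ := by
  show (if ax = 0 then (⟨ans, hz, vt, ax, ay⟩ : SA)
    else
      let s' := if mget hz ay (ax - 1) ≠ 1 then (⟨ans + 1, mset hz ay (ax - 1), vt, ax, ay⟩ : SA)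
        else ⟨ans, hz, vt, ax, ay⟩
      (⟨s'.ans, s'.horiz, s'.verti, s'.cx - 1, s'.cy⟩ : SA)) = _
  by_cases hb : ax = 0
  · rw [if_pos hb, if_pos hb]
  · rw [if_neg hb, if_neg hb]
    by_cases hm : mget hz ay (ax - 1) ≠ 1
    · rw [if_pos hm, if_pos hm]
    · rw [if_neg hm, if_neg hm]

lemma stepA_other (s : SA) (e : Char) (h1 : e ≠ 'U') (h2 : e ≠ 'D') (h3 : e ≠ 'R') (h4 : e ≠ 'L') :
    stepA s e = s := by
  simp [stepA, h1, h2, h3, h4]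

lemma stepB_U (bx byy : Int) (w : List Int) :
    stepB ⟨bx, byy, w⟩ 'U' =
    if 0 ≤ bx ∧ bx ≤ 10 ∧ 0 ≤ byy + 1 ∧ byy + 1 ≤ 10 then
      ⟨bx, byy + 1, w ++ [encV bx byy]⟩
    else ⟨bx, byy, w⟩ := by
  show (if 0 ≤ bx + 0 ∧ bx + 0 ≤ 10 ∧ 0 ≤ byy + 1 ∧ byy + 1 ≤ 10 then
      (⟨bx + 0, byy + 1, w ++ [(min bx (bx + 0) * 11 + min byy (byy + 1)) * 121 +
        (max bx (bx + 0) * 11 + max byy (byy + 1))]⟩ : SB)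
    else ⟨bx, byy, w⟩) = _
  rw [show bx + 0 = bx from add_zero bx, min_self, max_self,
    min_eq_left (show byy ≤ byy + 1 by omega), max_eq_right (show byy ≤ byy + 1 by omega)]
  rfl

lemma stepB_D (bx byy : Int) (w : List Int) :
    stepB ⟨bx, byy, w⟩ 'D' =
    if 0 ≤ bx ∧ bx ≤ 10 ∧ 0 ≤ byy - 1 ∧ byy - 1 ≤ 10 then
      ⟨bx, byy - 1, w ++ [encV bx (byy - 1)]⟩
    else ⟨bx, byy, w⟩ := by
  show (if 0 ≤ bx + 0 ∧ bx + 0 ≤ 10 ∧ 0 ≤ byy + -1 ∧ byy + -1 ≤ 10 then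
      (⟨bx + 0, byy + -1, w ++ [(min bx (bx + 0) * 11 + min byy (byy + -1)) * 121 +
        (max bx (bx + 0) * 11 + max byy (byy + -1))]⟩ : SB)
    else ⟨bx, byy, w⟩) = _
  rw [show bx + 0 = bx from add_zero bx, show byy + -1 = byy - 1 by ring, min_self, max_self,
    min_eq_right (show byy - 1 ≤ byy by omega), max_eq_left (show byy - 1 ≤ byy by omega)]
  show _ = (if _ then (⟨bx, byy - 1, w ++ [(bx * 11 + (byy - 1)) * 121 + (bx * 11 + (byy - 1 + 1))]⟩ : SB) else _)
  rw [show byy - 1 + 1 = byy by ring]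

lemma stepB_R (bx byy : Int) (w : List Int) :
    stepB ⟨bx, byy, w⟩ 'R' =
    if 0 ≤ bx + 1 ∧ bx + 1 ≤ 10 ∧ 0 ≤ byy ∧ byy ≤ 10 then
      ⟨bx + 1, byy, w ++ [encH bx byy]⟩
    else ⟨bx, byy, w⟩ := by
  show (if 0 ≤ bx + 1 ∧ bx + 1 ≤ 10 ∧ 0 ≤ byy + 0 ∧ byy + 0 ≤ 10 then
      (⟨bx + 1, byy + 0, w ++ [(min bx (bx + 1) * 11 + min byy (byy + 0)) * 121 +
        (max bx (bx + 1) * 11 + max byy (byy + 0))]⟩ : SB)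
    else ⟨bx, byy, w⟩) = _
  rw [show byy + 0 = byy from add_zero byy, min_self, max_self,
    min_eq_left (show bx ≤ bx + 1 by omega), max_eq_right (show bx ≤ bx + 1 by omega)]
  rfl

lemma stepB_L (bx byy : Int) (w : List Int) :
    stepB ⟨bx, byy, w⟩ 'L' =
    if 0 ≤ bx - 1 ∧ bx - 1 ≤ 10 ∧ 0 ≤ byy ∧ byy ≤ 10 then
      ⟨bx - 1, byy, w ++ [encH (bx - 1) byy]⟩
    else ⟨bx, byy, w⟩ := by
  show (if 0 ≤ bx + -1 ∧ bx + -1 ≤ 10 ∧ 0 ≤ byy + 0 ∧ byy + 0 ≤ 10 then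
      (⟨bx + -1, byy + 0, w ++ [(min bx (bx + -1) * 11 + min byy (byy + 0)) * 121 +
        (max bx (bx + -1) * 11 + max byy (byy + 0))]⟩ : SB)
    else ⟨bx, byy, w⟩) = _
  rw [show byy + 0 = byy from add_zero byy, show bx + -1 = bx - 1 by ring, min_self, max_self,
    min_eq_right (show bx - 1 ≤ bx by omega), max_eq_left (show bx - 1 ≤ bx by omega)]
  show _ = (if _ then (⟨bx - 1, byy, w ++ [((bx - 1) * 11 + byy) * 121 + ((bx - 1 + 1) * 11 + byy)]⟩ : SB) else _)
  rw [show bx - 1 + 1 = bx by ring]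

lemma stepB_other (s : SB) (e : Char) (h1 : e ≠ 'U') (h2 : e ≠ 'D') (h3 : e ≠ 'R') (h4 : e ≠ 'L') :
    stepB s e = s := by
  have hit : moves.items = [('U', ((0 : Int), (1 : Int))), ('D', (0, -1)), ('L', (-1, 0)), ('R', (1, 0))] := by decide
  have hd : PySem.Dict.get? moves e = none := by
    simp [PySem.Dict.get?, hit]
    exact ⟨Ne.symm h1, Ne.symm h2, Ne.symm h4, Ne.symm h3⟩
  simp [stepB, hd]

-- appending a fresh edge id bumps the distinct count by one
lemma ofList_append_mem (l : List Int) (e : Int) (h : e ∈ l) :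
    PySem.Set.ofList (l ++ [e]) = PySem.Set.ofList l := by
  rw [PySem.Set.ofList_eq_foldl, List.foldl_append, ← PySem.Set.ofList_eq_foldl]
  exact PySem.Set.add_of_mem (by rw [PySem.Set.mem_ofList]; exact h)

lemma ofList_append_not_mem (l : List Int) (e : Int) (h : e ∉ l) :
    PySem.Set.ofList (l ++ [e]) = PySem.Set.ofList l ++ [e] := by
  rw [PySem.Set.ofList_eq_foldl, List.foldl_append, ← PySem.Set.ofList_eq_foldl]
  exact PySem.Set.add_of_not_mem (by rw [PySem.Set.mem_ofList]; exact h)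

lemma encV_eq_encV (x y x' y' : Int) (h1 : 0 ≤ x) (h2 : x ≤ 10) (h3 : 0 ≤ y) (h4 : y < 10)
    (h1' : 0 ≤ x') (h2' : x' ≤ 10) (h3' : 0 ≤ y') (h4' : y' < 10) :
    encV x y = encV x' y' ↔ x = x' ∧ y = y' := by
  unfold encV; omega

lemma encV_ne_encH (x y x' y' : Int) (h1 : 0 ≤ x) (h2 : x ≤ 10) (h3 : 0 ≤ y) (h4 : y < 10)
    (h1' : 0 ≤ x') (h2' : x' < 10) (h3' : 0 ≤ y') (h4' : y' ≤ 10) :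
    encV x y ≠ encH x' y' := by
  unfold encV encH; omega

lemma encH_eq_encH (x y x' y' : Int) (h1 : 0 ≤ x) (h2 : x < 10) (h3 : 0 ≤ y) (h4 : y ≤ 10)
    (h1' : 0 ≤ x') (h2' : x' < 10) (h3' : 0 ≤ y') (h4' : y' ≤ 10) :
    encH x y = encH x' y' ↔ x = x' ∧ y = y' := by
  unfold encH; omega

lemma step_inv (a : SA) (b : SB) (h : InvAB a b) (e : Char) : InvAB (stepA a e) (stepB b e) := by
  obtain ⟨ans, hz, vt, ax, ay⟩ := a
  obtain ⟨bx, byy, w⟩ := b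
  obtain ⟨hx, hy, hx0, hx10, hy0, hy10, hans, hhl, hhr, hvl, hvr, hV, hH⟩ := h
  replace hx : ax = bx := hx
  replace hy : ay = byy := hy
  subst hx; subst hy
  replace hx0 : 0 ≤ ax := hx0
  replace hx10 : ax ≤ 10 := hx10
  replace hy0 : 0 ≤ ay := hy0
  replace hy10 : ay ≤ 10 := hy10
  replace hans : ans = ((PySem.Set.ofList w).length : Int) := hans
  replace hhl : hz.length = 11 := hhl
  replace hhr : ∀ r ∈ hz, r.length = 10 := hhr
  replace hvl : vt.length = 11 := hvl
  replace hvr : ∀ r ∈ vt, r.length = 10 := hvr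
  replace hV : ∀ x y : Int, 0 ≤ x → x ≤ 10 → 0 ≤ y → y < 10 →
      (mget vt x y = 1 ↔ encV x y ∈ w) := hV
  replace hH : ∀ x y : Int, 0 ≤ x → x < 10 → 0 ≤ y → y ≤ 10 →
      (mget hz y x = 1 ↔ encH x y ∈ w) := hH
  by_cases hU : e = 'U'
  · subst hU
    rw [stepA_U, stepB_U]
    by_cases hb : ay = 10
    · rw [if_pos hb, if_neg (by omega)]
      exact ⟨rfl, rfl, hx0, hx10, hy0, hy10, hans, hhl, hhr, hvl, hvr, hV, hH⟩
    · rw [if_neg hb, if_pos (show 0 ≤ ax ∧ ax ≤ 10 ∧ 0 ≤ ay + 1 ∧ ay + 1 ≤ 10 by omega)]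
      have hiff := hV ax ay hx0 hx10 hy0 (by omega)
      by_cases hm : mget vt ax ay = 1
      · rw [if_neg (not_not_intro hm)]
        refine ⟨rfl, rfl, hx0, hx10, show (0:Int) ≤ ay + 1 by omega, show ay + 1 ≤ (10:Int) by omega, ?_, hhl, hhr, hvl, hvr, ?_, ?_⟩
        · rw [ofList_append_mem w _ (hiff.mp hm)]; exact hans
        · intro x y hx1 hx2 hy1 hy2
          rw [List.mem_append, List.mem_singleton]
          constructor
          · intro hg; exact Or.inl ((hV x y hx1 hx2 hy1 hy2).mp hg)
          · rintro (hg | hg)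
            · exact (hV x y hx1 hx2 hy1 hy2).mpr hg
            · have := (encV_eq_encV x y ax ay hx1 hx2 hy1 hy2 hx0 hx10 hy0 (by omega)).mp hg
              obtain ⟨rfl, rfl⟩ := this
              exact hm
        · intro x y hx1 hx2 hy1 hy2
          rw [List.mem_append, List.mem_singleton]
          constructor
          · intro hg; exact Or.inl ((hH x y hx1 hx2 hy1 hy2).mp hg)
          · rintro (hg | hg)
            · exact (hH x y hx1 hx2 hy1 hy2).mpr hg
            · exact absurd hg.symm (encV_ne_encH ax ay x y hx0 hx10 hy0 (by omega) hx1 hx2 hy1 hy2)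
      · have hmem : encV ax ay ∉ w := fun hc => hm (hiff.mpr hc)
        rw [if_pos hm]
        obtain ⟨hvl', hvr'⟩ := mset_shape vt hvl hvr ax ay
        refine ⟨rfl, rfl, hx0, hx10, show (0:Int) ≤ ay + 1 by omega, show ay + 1 ≤ (10:Int) by omega, ?_, hhl, hhr, hvl', hvr', ?_, ?_⟩
        · rw [ofList_append_not_mem w _ hmem]
          simp only [List.length_append, List.length_cons, List.length_nil]
          push_cast; omega
        · intro x y hx1 hx2 hy1 hy2
          rw [mget_mset vt hvl hvr ax ay x y hx0 hx10 hy0 (by omega) hx1 hx2 hy1 hy2,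
            List.mem_append, List.mem_singleton]
          constructor
          · intro hg
            split at hg
            · right
              exact (encV_eq_encV x y ax ay hx1 hx2 hy1 hy2 hx0 hx10 hy0 (by omega)).mpr (by omega)
            · exact Or.inl ((hV x y hx1 hx2 hy1 hy2).mp hg)
          · rintro (hg | hg)
            · rw [if_neg ?_]
              · exact (hV x y hx1 hx2 hy1 hy2).mpr hg
              · rintro ⟨rfl, rfl⟩; exact hmem hg
            · have := (encV_eq_encV x y ax ay hx1 hx2 hy1 hy2 hx0 hx10 hy0 (by omega)).mp hg
              rw [if_pos (by omega)]
        · intro x y hx1 hx2 hy1 hy2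
          rw [List.mem_append, List.mem_singleton]
          constructor
          · intro hg; exact Or.inl ((hH x y hx1 hx2 hy1 hy2).mp hg)
          · rintro (hg | hg)
            · exact (hH x y hx1 hx2 hy1 hy2).mpr hg
            · exact absurd hg.symm (encV_ne_encH ax ay x y hx0 hx10 hy0 (by omega) hx1 hx2 hy1 hy2)
  · by_cases hD : e = 'D'
    · subst hD
      rw [stepA_D, stepB_D]
      by_cases hb : ay = 0
      · rw [if_pos hb, if_neg (by omega)]
        exact ⟨rfl, rfl, hx0, hx10, hy0, hy10, hans, hhl, hhr, hvl, hvr, hV, hH⟩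
      · rw [if_neg hb, if_pos (show 0 ≤ ax ∧ ax ≤ 10 ∧ 0 ≤ ay - 1 ∧ ay - 1 ≤ 10 by omega)]
        have hiff := hV ax (ay - 1) hx0 hx10 (by omega) (by omega)
        by_cases hm : mget vt ax (ay - 1) = 1
        · rw [if_neg (not_not_intro hm)]
          refine ⟨rfl, rfl, hx0, hx10, show (0:Int) ≤ ay - 1 by omega, show ay - 1 ≤ (10:Int) by omega, ?_, hhl, hhr, hvl, hvr, ?_, ?_⟩
          · rw [ofList_append_mem w _ (hiff.mp hm)]; exact hans
          · intro x y hx1 hx2 hy1 hy2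
            rw [List.mem_append, List.mem_singleton]
            constructor
            · intro hg; exact Or.inl ((hV x y hx1 hx2 hy1 hy2).mp hg)
            · rintro (hg | hg)
              · exact (hV x y hx1 hx2 hy1 hy2).mpr hg
              · have := (encV_eq_encV x y ax (ay - 1) hx1 hx2 hy1 hy2 hx0 hx10 (by omega) (by omega)).mp hg
                obtain ⟨rfl, rfl⟩ := this
                exact hm
          · intro x y hx1 hx2 hy1 hy2
            rw [List.mem_append, List.mem_singleton]
            constructor
            · intro hg; exact Or.inl ((hH x y hx1 hx2 hy1 hy2).mp hg)
            · rintro (hg | hg)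
              · exact (hH x y hx1 hx2 hy1 hy2).mpr hg
              · exact absurd hg.symm (encV_ne_encH ax (ay - 1) x y hx0 hx10 (by omega) (by omega) hx1 hx2 hy1 hy2)
        · have hmem : encV ax (ay - 1) ∉ w := fun hc => hm (hiff.mpr hc)
          rw [if_pos hm]
          obtain ⟨hvl', hvr'⟩ := mset_shape vt hvl hvr ax (ay - 1)
          refine ⟨rfl, rfl, hx0, hx10, show (0:Int) ≤ ay - 1 by omega, show ay - 1 ≤ (10:Int) by omega, ?_, hhl, hhr, hvl', hvr', ?_, ?_⟩
          · rw [ofList_append_not_mem w _ hmem]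
            simp only [List.length_append, List.length_cons, List.length_nil]
            push_cast; omega
          · intro x y hx1 hx2 hy1 hy2
            rw [mget_mset vt hvl hvr ax (ay - 1) x y hx0 hx10 (by omega) (by omega) hx1 hx2 hy1 hy2,
              List.mem_append, List.mem_singleton]
            constructor
            · intro hg
              split at hg
              · right
                exact (encV_eq_encV x y ax (ay - 1) hx1 hx2 hy1 hy2 hx0 hx10 (by omega) (by omega)).mpr (by omega)
              · exact Or.inl ((hV x y hx1 hx2 hy1 hy2).mp hg)
            · rintro (hg | hg)
              · rw [if_neg ?_]
                · exact (hV x y hx1 hx2 hy1 hy2).mpr hg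
                · rintro ⟨rfl, rfl⟩; exact hmem hg
              · have := (encV_eq_encV x y ax (ay - 1) hx1 hx2 hy1 hy2 hx0 hx10 (by omega) (by omega)).mp hg
                rw [if_pos (by omega)]
          · intro x y hx1 hx2 hy1 hy2
            rw [List.mem_append, List.mem_singleton]
            constructor
            · intro hg; exact Or.inl ((hH x y hx1 hx2 hy1 hy2).mp hg)
            · rintro (hg | hg)
              · exact (hH x y hx1 hx2 hy1 hy2).mpr hg
              · exact absurd hg.symm (encV_ne_encH ax (ay - 1) x y hx0 hx10 (by omega) (by omega) hx1 hx2 hy1 hy2)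
    · by_cases hR : e = 'R'
      · subst hR
        rw [stepA_R, stepB_R]
        by_cases hb : ax = 10
        · rw [if_pos hb, if_neg (by omega)]
          exact ⟨rfl, rfl, hx0, hx10, hy0, hy10, hans, hhl, hhr, hvl, hvr, hV, hH⟩
        · rw [if_neg hb, if_pos (show 0 ≤ ax + 1 ∧ ax + 1 ≤ 10 ∧ 0 ≤ ay ∧ ay ≤ 10 by omega)]
          have hiff := hH ax ay hx0 (by omega) hy0 hy10
          by_cases hm : mget hz ay ax = 1
          · rw [if_neg (not_not_intro hm)]
            refine ⟨rfl, rfl, show (0:Int) ≤ ax + 1 by omega, show ax + 1 ≤ (10:Int) by omega, hy0, hy10, ?_, hhl, hhr, hvl, hvr, ?_, ?_⟩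
            · rw [ofList_append_mem w _ (hiff.mp hm)]; exact hans
            · intro x y hx1 hx2 hy1 hy2
              rw [List.mem_append, List.mem_singleton]
              constructor
              · intro hg; exact Or.inl ((hV x y hx1 hx2 hy1 hy2).mp hg)
              · rintro (hg | hg)
                · exact (hV x y hx1 hx2 hy1 hy2).mpr hg
                · exact absurd hg (encV_ne_encH x y ax ay hx1 hx2 hy1 hy2 hx0 (by omega) hy0 hy10)
            · intro x y hx1 hx2 hy1 hy2
              rw [List.mem_append, List.mem_singleton]
              constructor
              · intro hg; exact Or.inl ((hH x y hx1 hx2 hy1 hy2).mp hg)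
              · rintro (hg | hg)
                · exact (hH x y hx1 hx2 hy1 hy2).mpr hg
                · have := (encH_eq_encH x y ax ay hx1 hx2 hy1 hy2 hx0 (by omega) hy0 hy10).mp hg
                  obtain ⟨rfl, rfl⟩ := this
                  exact hm
          · have hmem : encH ax ay ∉ w := fun hc => hm (hiff.mpr hc)
            rw [if_pos hm]
            obtain ⟨hhl', hhr'⟩ := mset_shape hz hhl hhr ay ax
            refine ⟨rfl, rfl, show (0:Int) ≤ ax + 1 by omega, show ax + 1 ≤ (10:Int) by omega, hy0, hy10, ?_, hhl', hhr', hvl, hvr, ?_, ?_⟩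
            · rw [ofList_append_not_mem w _ hmem]
              simp only [List.length_append, List.length_cons, List.length_nil]
              push_cast; omega
            · intro x y hx1 hx2 hy1 hy2
              rw [List.mem_append, List.mem_singleton]
              constructor
              · intro hg; exact Or.inl ((hV x y hx1 hx2 hy1 hy2).mp hg)
              · rintro (hg | hg)
                · exact (hV x y hx1 hx2 hy1 hy2).mpr hg
                · exact absurd hg (encV_ne_encH x y ax ay hx1 hx2 hy1 hy2 hx0 (by omega) hy0 hy10)
            · intro x y hx1 hx2 hy1 hy2
              rw [mget_mset hz hhl hhr ay ax y x hy0 hy10 hx0 (by omega) hy1 hy2 hx1 hx2,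
                List.mem_append, List.mem_singleton]
              constructor
              · intro hg
                split at hg
                · right
                  exact (encH_eq_encH x y ax ay hx1 hx2 hy1 hy2 hx0 (by omega) hy0 hy10).mpr (by omega)
                · exact Or.inl ((hH x y hx1 hx2 hy1 hy2).mp hg)
              · rintro (hg | hg)
                · rw [if_neg ?_]
                  · exact (hH x y hx1 hx2 hy1 hy2).mpr hg
                  · rintro ⟨rfl, rfl⟩; exact hmem hg
                · have := (encH_eq_encH x y ax ay hx1 hx2 hy1 hy2 hx0 (by omega) hy0 hy10).mp hg
                  rw [if_pos (by omega)]
      · by_cases hL : e = 'L'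
        · subst hL
          rw [stepA_L, stepB_L]
          by_cases hb : ax = 0
          · rw [if_pos hb, if_neg (by omega)]
            exact ⟨rfl, rfl, hx0, hx10, hy0, hy10, hans, hhl, hhr, hvl, hvr, hV, hH⟩
          · rw [if_neg hb, if_pos (show 0 ≤ ax - 1 ∧ ax - 1 ≤ 10 ∧ 0 ≤ ay ∧ ay ≤ 10 by omega)]
            have hiff := hH (ax - 1) ay (by omega) (by omega) hy0 hy10
            by_cases hm : mget hz ay (ax - 1) = 1
            · rw [if_neg (not_not_intro hm)]
              refine ⟨rfl, rfl, show (0:Int) ≤ ax - 1 by omega, show ax - 1 ≤ (10:Int) by omega, hy0, hy10, ?_, hhl, hhr, hvl, hvr, ?_, ?_⟩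
              · rw [ofList_append_mem w _ (hiff.mp hm)]; exact hans
              · intro x y hx1 hx2 hy1 hy2
                rw [List.mem_append, List.mem_singleton]
                constructor
                · intro hg; exact Or.inl ((hV x y hx1 hx2 hy1 hy2).mp hg)
                · rintro (hg | hg)
                  · exact (hV x y hx1 hx2 hy1 hy2).mpr hg
                  · exact absurd hg (encV_ne_encH x y (ax - 1) ay hx1 hx2 hy1 hy2 (by omega) (by omega) hy0 hy10)
              · intro x y hx1 hx2 hy1 hy2
                rw [List.mem_append, List.mem_singleton]
                constructor
                · intro hg; exact Or.inl ((hH x y hx1 hx2 hy1 hy2).mp hg)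
                · rintro (hg | hg)
                  · exact (hH x y hx1 hx2 hy1 hy2).mpr hg
                  · have := (encH_eq_encH x y (ax - 1) ay hx1 hx2 hy1 hy2 (by omega) (by omega) hy0 hy10).mp hg
                    obtain ⟨rfl, rfl⟩ := this
                    exact hm
            · have hmem : encH (ax - 1) ay ∉ w := fun hc => hm (hiff.mpr hc)
              rw [if_pos hm]
              obtain ⟨hhl', hhr'⟩ := mset_shape hz hhl hhr ay (ax - 1)
              refine ⟨rfl, rfl, show (0:Int) ≤ ax - 1 by omega, show ax - 1 ≤ (10:Int) by omega, hy0, hy10, ?_, hhl', hhr', hvl, hvr, ?_, ?_⟩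
              · rw [ofList_append_not_mem w _ hmem]
                simp only [List.length_append, List.length_cons, List.length_nil]
                push_cast; omega
              · intro x y hx1 hx2 hy1 hy2
                rw [List.mem_append, List.mem_singleton]
                constructor
                · intro hg; exact Or.inl ((hV x y hx1 hx2 hy1 hy2).mp hg)
                · rintro (hg | hg)
                  · exact (hV x y hx1 hx2 hy1 hy2).mpr hg
                  · exact absurd hg (encV_ne_encH x y (ax - 1) ay hx1 hx2 hy1 hy2 (by omega) (by omega) hy0 hy10)
              · intro x y hx1 hx2 hy1 hy2
                rw [mget_mset hz hhl hhr ay (ax - 1) y x hy0 hy10 (by omega) (by omega) hy1 hy2 hx1 hx2,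
                  List.mem_append, List.mem_singleton]
                constructor
                · intro hg
                  split at hg
                  · right
                    exact (encH_eq_encH x y (ax - 1) ay hx1 hx2 hy1 hy2 (by omega) (by omega) hy0 hy10).mpr (by omega)
                  · exact Or.inl ((hH x y hx1 hx2 hy1 hy2).mp hg)
                · rintro (hg | hg)
                  · rw [if_neg ?_]
                    · exact (hH x y hx1 hx2 hy1 hy2).mpr hg
                    · rintro ⟨rfl, rfl⟩; exact hmem hg
                  · have := (encH_eq_encH x y (ax - 1) ay hx1 hx2 hy1 hy2 (by omega) (by omega) hy0 hy10).mp hg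
                    rw [if_pos (by omega)]
        · rw [stepA_other _ e hU hD hR hL, stepB_other _ e hU hD hR hL]
          exact ⟨rfl, rfl, hx0, hx10, hy0, hy10, hans, hhl, hhr, hvl, hvr, hV, hH⟩

lemma foldl_inv (l : List Char) (a : SA) (b : SB) (h : InvAB a b) :
    InvAB (l.foldl stepA a) (l.foldl stepB b) := by
  induction l generalizing a b with
  | nil => exact h
  | cons c t ih => exact ih _ _ (step_inv a b h c)

lemma mget_init (x y : Int) : mget initM x y = 0 := by
  unfold mget initM
  have h1 : (List.replicate 11 (List.replicate 10 (0 : Int))).getD x.toNat []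
      = if x.toNat < 11 then List.replicate 10 0 else [] := by
    rw [List.getD_eq_getElem?_getD, List.getElem?_replicate]
    split <;> rfl
  rw [h1]
  split
  · rw [List.getD_eq_getElem?_getD, List.getElem?_replicate]
    split <;> rfl
  · rfl

lemma init_inv : InvAB ⟨0, initM, initM, 5, 5⟩ ⟨5, 5, []⟩ := by
  refine ⟨rfl, rfl, by norm_num, by norm_num, by norm_num, by norm_num, rfl,
    by simp [initM], ?_, by simp [initM], ?_, ?_, ?_⟩
  · intro r hr
    simp [List.eq_of_mem_replicate (show r ∈ List.replicate 11 (List.replicate 10 (0:Int)) from hr)]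
  · intro r hr
    simp [List.eq_of_mem_replicate (show r ∈ List.replicate 11 (List.replicate 10 (0:Int)) from hr)]
  · intro x y _ _ _ _
    simp [mget_init]
  · intro x y _ _ _ _
    simp [mget_init]

-- the card of an insert counted through an erase
lemma card_insert_erase (a : Int) (s : Finset Int) :
    (insert a s).card = (s.erase a).card + 1 := by
  by_cases h : a ∈ s
  · rw [Finset.insert_eq_self.mpr h, Finset.card_erase_of_mem h]
    have : 1 ≤ s.card := Finset.card_pos.mpr ⟨a, h⟩
    omega
  · rw [Finset.card_insert_of_notMem h, Finset.erase_eq_of_notMem h]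

-- the sweep over a ≤-sorted list counts the distinct values
lemma sweep_some (l : List Int) (hl : l.Pairwise (· ≤ ·)) :
    ∀ (c v : Int), (∀ x ∈ l, v ≤ x) →
    (l.foldl sweepStep (c, some v)).1 = c + ((l.toFinset.erase v).card : Int) := by
  induction l with
  | nil => intro c v _; simp
  | cons a t ih =>
    intro c v hv
    have hat : ∀ x ∈ t, a ≤ x := (List.pairwise_cons.mp hl).1
    have ht : t.Pairwise (· ≤ ·) := (List.pairwise_cons.mp hl).2
    by_cases hav : a = v
    · subst hav
      have h1 : sweepStep (c, some a) a = (c, some a) := by simp [sweepStep]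
      rw [List.foldl_cons, h1, ih ht c a hat]
      congr 2
      rw [List.toFinset_cons, Finset.erase_insert_eq_erase]
    · have h1 : sweepStep (c, some v) a = (c + 1, some a) := by
        simp [sweepStep, hav]
      rw [List.foldl_cons, h1, ih ht (c + 1) a hat]
      have hva : v ≤ a := hv a (List.mem_cons_self)
      have hnot : v ∉ (a :: t).toFinset := by
        simp only [List.toFinset_cons, Finset.mem_insert, List.mem_toFinset]
        rintro (h | h)
        · exact hav h.symm
        · have := hat v h; omega
      rw [Finset.erase_eq_of_notMem hnot, List.toFinset_cons, card_insert_erase]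
      push_cast; omega

lemma sweep_none (l : List Int) (hl : l.Pairwise (· ≤ ·)) :
    (l.foldl sweepStep (0, none)).1 = (l.toFinset.card : Int) := by
  cases l with
  | nil => simp
  | cons a t =>
    have hat : ∀ x ∈ t, a ≤ x := (List.pairwise_cons.mp hl).1
    have ht : t.Pairwise (· ≤ ·) := (List.pairwise_cons.mp hl).2
    have h1 : sweepStep (0, none) a = (1, some a) := by simp [sweepStep]
    rw [List.foldl_cons, h1, sweep_some t ht 1 a hat, List.toFinset_cons, card_insert_erase]
    push_cast; omega

lemma perm_toFinset (l1 l2 : List Int) (h : l1.Perm l2) : l1.toFinset = l2.toFinset := by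
  ext x
  simp only [List.mem_toFinset]
  exact h.mem_iff

lemma ofList_length_eq_card (l : List Int) :
    (PySem.Set.ofList l).length = l.toFinset.card := by
  rw [← List.toFinset_card_of_nodup (PySem.Set.nodup_ofList l)]
  congr 1
  ext x
  simp only [List.mem_toFinset, PySem.Set.mem_ofList]

-- ===== VERDICT (by name: the statement is the Claim_ definition above) =====
theorem solution_spec : Claim_equal_solution := by
  intro dirs _
  unfold Spec_solution solution solution_alt
  have hinv := foldl_inv dirs.toList _ _ init_inv
  set fin := dirs.toList.foldl stepB ⟨5, 5, []⟩ with hfin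
  rw [hinv.2.2.2.2.2.2.1]
  have hsorted := PySem.List.sorted_pairwise fin.walked (fun e => e)
  rw [sweep_none _ hsorted,
    perm_toFinset _ _ (PySem.List.sorted_perm fin.walked (fun e => e) false),
    ofList_length_eq_card]
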